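-- pv_equiv track=rewrite | github.com/Err0rCode7/algorithm | kakao/2020/search_words_trie.py | solution
-- ===== SOURCE A (Python) =====
-- class node :
--
-- 	def __init__(self, val) :
-- 		self.val = val
-- 		self.child = {}
-- 		self.count = 0
--
-- def add(parent, word) :
-- 	cur = parent
-- 	for ch in word :
-- 		if ch not in cur.child :
-- 			cur.child[ch] = node(ch)
-- 		cur.count += 1
-- 		cur = cur.child[ch]
-- 	cur.child['*'] = True
--
-- def search(parent, word) :
-- 	cur = parent
--
-- 	for c in word :
-- 		if '?' == c :
-- 			break
-- 		if c not in cur.child :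
-- 			return 0
-- 		cur = cur.child[c]
-- 	return cur.count
--
-- def solution(words, queries):
--
-- 	trie_list = [node(None) for _ in range(int(1e5))]
-- 	trie_list_rev = [node(None) for _ in range(int(1e5))]
-- 	answer = []
-- 	for word in words :
-- 		add(trie_list[len(word)], word)
-- 		add(trie_list_rev[len(word)], word[::-1])
--
-- 	for query in queries :
-- 		if query[0] == '?' :
-- 			answer.append(search(trie_list_rev[len(query)], query[::-1]))
-- 		else :
-- 			answer.append(search(trie_list[len(query)], query))
-- 	return answer
-- ===== SOURCE B (Python) =====
-- def _prefix_counts(words):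
--     # how many words of length L start with each non-empty proper prefix p: key (L, p)
--     d = {}
--     for w in words:
--         L = len(w)
--         for i in range(1, L):
--             k = (L, w[:i])
--             d[k] = d.get(k, 0) + 1
--     return d
--
-- def solution(words, queries):
--     lencnt = {}
--     for w in words:
--         lencnt[len(w)] = lencnt.get(len(w), 0) + 1
--     fwd = _prefix_counts(words)
--     rev = _prefix_counts([w[::-1] for w in words])
--     answer = []
--     for q in queries:
--         t = q[::-1] if q[0] == '?' else q
--         i = t.find('?')
--         if i == -1:
--             answer.append(0)          # queries without a wildcard match nothing (as in A)
--         elif i == 0: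
--             answer.append(lencnt.get(len(q), 0))
--         else:
--             d = rev if q[0] == '?' else fwd
--             answer.append(d.get((len(q), t[:i]), 0))
--     return answer
-- ===== Notes on version B (the rewrite author's own statement) =====
-- stated objective: alternative
-- what changed: Replaces the two arrays of 100000 linked trie objects (built node by node and walked char by char) with three flat hash maps counting words per length and per (length, prefix)/(length, reversed-prefix), so each query is answered by a single dictionary lookup keyed on the text before its first '?'.
import Mathlib
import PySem

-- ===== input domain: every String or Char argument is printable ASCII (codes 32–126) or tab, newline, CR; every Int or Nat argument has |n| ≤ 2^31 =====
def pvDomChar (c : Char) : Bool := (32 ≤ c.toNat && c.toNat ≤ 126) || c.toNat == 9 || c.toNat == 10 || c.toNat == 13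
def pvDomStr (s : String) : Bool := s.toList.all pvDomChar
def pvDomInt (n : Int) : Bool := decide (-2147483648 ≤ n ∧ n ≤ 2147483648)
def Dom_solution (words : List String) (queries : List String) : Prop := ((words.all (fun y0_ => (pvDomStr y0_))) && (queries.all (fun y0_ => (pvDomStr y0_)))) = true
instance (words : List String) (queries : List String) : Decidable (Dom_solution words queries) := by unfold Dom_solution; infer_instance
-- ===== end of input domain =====

-- B replaces A's 200000 pre-allocated per-length tries by flat dictionaries counting words per
-- length and per (length, prefix) / (length, reversed prefix): a different algorithm of similar
-- cost (one dictionary lookup per query instead of a per-character trie walk).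

-- ===== PORT A =====
-- A's `node` objects: value `val` never influences the result and is dropped; the leaf marker
-- `cur.child['*'] = True` is modeled as the Bool flag (it sits at depth = word length in a trie
-- holding only words of that exact length, so neither `add` nor `search` ever reads it).
-- a child-edge list entry carries its node's fields (count, leaf flag, own children): this flat
-- encoding of the node tree avoids a nested inductive and is the same object graph
inductive Kids : Type
  | nil
  | cons (c : Char) (cnt : Int) (star : Bool) (sub : Kids) (rest : Kids)

structure Trie where
  cnt : Int
  star : Bool
  kids : Kids

def emptyT : Trie := ⟨0, false, .nil⟩

-- cur.child lookup / assignment (Python dict: overwrite in place, new keys append)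
def kidsGet? : Kids → Char → Option Trie
  | .nil, _ => none
  | .cons c cnt star sub rest, x =>
      if x = c then some ⟨cnt, star, sub⟩ else kidsGet? rest x

def kidsSet : Kids → Char → Trie → Kids
  | .nil, x, v => .cons x v.cnt v.star v.kids .nil
  | .cons c cnt star sub rest, x, v =>
      if x = c then .cons c v.cnt v.star v.kids rest
      else .cons c cnt star sub (kidsSet rest x v)

-- def add(parent, word)
def addW : Trie → List Char → Trie
  | t, [] => ⟨t.cnt, true, t.kids⟩                 -- cur.child['*'] = True
  | t, ch :: rest =>
      -- if ch not in cur.child : cur.child[ch] = node(ch);  cur.count += 1;  cur = cur.child[ch]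
      ⟨t.cnt + 1, t.star, kidsSet t.kids ch (addW ((kidsGet? t.kids ch).getD emptyT) rest)⟩

-- def search(parent, word)
def searchW : Trie → List Char → Int
  | t, [] => t.cnt
  | t, c :: rest =>
      if c = '?' then t.cnt                        -- break; return cur.count
      else match kidsGet? t.kids c with
        | none => 0                                -- return 0
        | some child => searchW child rest

-- trie_list / trie_list_rev: Python allocates a list of 100000 fresh tries and indexes it by
-- len(word); modeled as a Dict Int Trie with default emptyT — exact for all lengths < 100000
-- (Pre_solution); for longer strings Python raises IndexError (excluded by Pre_solution).
def solution (words : List String) (queries : List String) : List Int :=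
  let tries := words.foldl
    (fun (st : PySem.Dict Int Trie × PySem.Dict Int Trie) w =>
      (st.1.insert (w.toList.length : Int) (addW (st.1.getD (w.toList.length : Int) emptyT) w.toList),
       st.2.insert (w.toList.length : Int) (addW (st.2.getD (w.toList.length : Int) emptyT) w.toList.reverse)))
    (PySem.Dict.empty, PySem.Dict.empty)
  queries.foldl (fun acc q =>
    acc ++ [match q.toList with
      | [] => 0        -- query[0] raises IndexError on an empty query: outside Pre_solution
      | c :: _ =>
        if c = '?' then searchW (tries.2.getD (q.toList.length : Int) emptyT) q.toList.reverse
        else searchW (tries.1.getD (q.toList.length : Int) emptyT) q.toList]) []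

-- ===== PORT B =====
-- def _prefix_counts(words)   (dict keys (len(w), w[:i]): a Python str key is modeled by its
-- code-point list, equality of the two agrees)
def prefixCounts (ws : List String) : PySem.Dict (Int × List Char) Int :=
  ws.foldl (fun d w =>
    (PySem.List.pyRange 1 (w.toList.length : Int) 1).foldl
      (fun d i =>
        let k : Int × List Char := ((w.toList.length : Int), PySem.List.slice w.toList none (some i))
        d.insert k (d.getD k 0 + 1)) d)
    PySem.Dict.empty

def solution_alt (words : List String) (queries : List String) : List Int :=
  let lencnt := words.foldl
    (fun (d : PySem.Dict Int Int) w =>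
      d.insert (w.toList.length : Int) (d.getD (w.toList.length : Int) 0 + 1))
    PySem.Dict.empty
  let fwd := prefixCounts words
  let rev := prefixCounts (words.map (fun w => String.ofList w.toList.reverse))   -- w[::-1]
  queries.foldl (fun acc q =>
    acc ++ [match q.toList with
      | [] => 0        -- q[0] raises IndexError on an empty query: outside Pre_solution
      | c :: _ =>
        let t := if c = '?' then q.toList.reverse else q.toList
        let i := PySem.Chars.find t ['?']
        if i = -1 then 0
        else if i = 0 then lencnt.getD (q.toList.length : Int) 0
        else (if c = '?' then rev else fwd).getD
               ((q.toList.length : Int), PySem.List.slice t none (some i)) 0]) []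

-- ===== PRECONDITION & SPEC =====
-- Pre_ excludes exactly the inputs on which A raises IndexError: an empty query (query[0]) and
-- any word or query of length ≥ 100000 (trie_list has int(1e5) entries).
def Pre_solution (words : List String) (queries : List String) : Prop :=
  (∀ q ∈ queries, q.toList ≠ []) ∧ (∀ w ∈ words, w.toList.length < 100000) ∧
    (∀ q ∈ queries, q.toList.length < 100000)
instance (words : List String) (queries : List String) : Decidable (Pre_solution words queries) := by
  unfold Pre_solution; infer_instance

def pvWitness_solution : List String × List String := (["frodo", "front", "frost", "", "kakao"], ["fro??", "????o", "fr???", "?????", "ab?", "front"])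

def Spec_solution (words : List String) (queries : List String) (out : List Int) : Prop := out = solution_alt words queries
instance (words : List String) (queries : List String) (out : List Int) : Decidable (Spec_solution words queries out) := by unfold Spec_solution; infer_instance

-- ===== CLAIM (what is proved, stated in full; the proofs are below) =====
def Claim_equal_solution : Prop := ∀ (words : List String) (queries : List String), Dom_solution words queries → Pre_solution words queries → Spec_solution words queries (solution words queries)

-- ===== LEMMAS AND PROOFS =====

-- count at the node reached from t along path p (none: no such node)
def cntAt? : Trie → List Char → Option Int
  | t, [] => some t.cnt
  | t, c :: p =>
    match kidsGet? t.kids c with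
    | none => none
    | some child => cntAt? child p

-- index of the first '?' (length if none)
def qIdx : List Char → Nat
  | [] => 0
  | c :: r => if c = '?' then 0 else qIdx r + 1

theorem kidsGet?_kidsSet (k : Kids) (ch x : Char) (v : Trie) :
    kidsGet? (kidsSet k ch v) x = if x = ch then some v else kidsGet? k x := by
  induction k with
  | nil => simp [kidsSet, kidsGet?]
  | cons c cnt star sub rest ih =>
      by_cases h : ch = c
      · subst h; by_cases hx : x = ch <;> simp [kidsSet, kidsGet?, hx]
      · by_cases hx : x = ch <;> by_cases hc : x = c <;>
          simp_all [kidsSet, kidsGet?]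

theorem cntAt?_empty (p : List Char) :
    cntAt? emptyT p = if p = [] then some 0 else none := by
  cases p <;> simp [cntAt?, emptyT, kidsGet?]

theorem cntAt?_addW (p : List Char) : ∀ (w : List Char) (t : Trie),
    cntAt? (addW t w) p =
      match cntAt? t p with
      | some c => some (c + if p <+: w ∧ p ≠ w then 1 else 0)
      | none => if p <+: w then some (if p ≠ w then 1 else 0) else none := by
  induction p with
  | nil =>
      intro w t
      cases w with
      | nil => simp [addW, cntAt?]
      | cons ch rest => simp [addW, cntAt?]
  | cons c p' ih =>
      intro w t
      cases w with
      | nil =>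
          simp only [addW, cntAt?]
          cases h : kidsGet? t.kids c with
          | none => simp
          | some child => cases h2 : cntAt? child p' <;> simp [h2]
      | cons ch rest =>
          simp only [addW, cntAt?, kidsGet?_kidsSet]
          by_cases hc : c = ch
          · subst hc
            simp only [if_true]
            rw [ih rest ((kidsGet? t.kids c).getD emptyT)]
            cases h : kidsGet? t.kids c with
            | some child =>
                simp only [Option.getD_some]
                have hpw : (c :: p' <+: c :: rest ∧ c :: p' ≠ c :: rest) ↔ (p' <+: rest ∧ p' ≠ rest) := by
                  simp [List.cons_prefix_cons]
                cases h2 : cntAt? child p' with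
                | some v => simp
                | none => simp [List.cons_prefix_cons]
            | none =>
                simp only [Option.getD_none]
                rw [cntAt?_empty]
                by_cases hp : p' = []
                · subst hp
                  simp [List.cons_prefix_cons]
                · simp [hp, List.cons_prefix_cons]
          · simp only [if_neg hc]
            have hne : ¬ (c :: p' <+: ch :: rest) := by
              simp [List.cons_prefix_cons, hc]
            cases h : kidsGet? t.kids c with
            | some child => cases h2 : cntAt? child p' <;> simp [h2, hne]
            | none => simp [hne]

theorem cntAt?_build (ws : List (List Char)) (p : List Char) :
    cntAt? (ws.foldl addW emptyT) p =
      if p = [] ∨ ∃ w ∈ ws, p <+: w then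
        some ((ws.countP fun w => decide (p <+: w ∧ p ≠ w) : Nat) : Int)
      else none := by
  induction ws using List.reverseRecOn with
  | nil =>
      simp only [List.foldl_nil]
      rw [cntAt?_empty]
      by_cases hp : p = [] <;> simp [hp]
  | append_singleton ws w ih =>
      rw [List.foldl_append, List.foldl_cons, List.foldl_nil, cntAt?_addW, ih]
      by_cases hold : p = [] ∨ ∃ v ∈ ws, p <+: v
      · simp only [if_pos hold]
        have hnew : p = [] ∨ ∃ v ∈ ws ++ [w], p <+: v := by
          rcases hold with h | ⟨v, hv, hpv⟩
          · exact Or.inl h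
          · exact Or.inr ⟨v, by simp [hv], hpv⟩
        rw [if_pos hnew, List.countP_append]
        by_cases hw : p <+: w ∧ p ≠ w <;> simp [hw]
      · simp only [if_neg hold]
        push Not at hold
        by_cases hw : p <+: w
        · have hnew : p = [] ∨ ∃ v ∈ ws ++ [w], p <+: v := Or.inr ⟨w, by simp, hw⟩
          rw [if_pos hnew, List.countP_append]
          have h0 : ws.countP (fun v => decide (p <+: v ∧ p ≠ v)) = 0 := by
            rw [List.countP_eq_zero]
            intro v hv
            simp only [decide_eq_true_eq, not_and]
            intro hpv
            exact absurd hpv (hold.2 v hv)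
          by_cases hpw : p = w
          · have hz : List.countP (fun v => decide (p <+: v ∧ p ≠ v)) [w] = 0 :=
              List.countP_eq_zero.mpr (by simp [hpw])
            rw [h0, hz]
            simp [hpw]
          · rw [h0, List.countP_cons, List.countP_nil]
            simp [hw, hpw]
        · have hnew : ¬ (p = [] ∨ ∃ v ∈ ws ++ [w], p <+: v) := by
            push Not
            refine ⟨hold.1, fun v hv => ?_⟩
            rcases List.mem_append.mp hv with h | h
            · exact hold.2 v h
            · simp only [List.mem_singleton] at h; subst h; exact hw
          rw [if_neg hnew, if_neg hw]

theorem searchW_eq_cntAt? (q : List Char) : ∀ t : Trie,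
    searchW t q = (cntAt? t (q.take (qIdx q))).getD 0 := by
  induction q with
  | nil => intro t; simp [searchW, qIdx, cntAt?]
  | cons c r ih =>
      intro t
      by_cases hc : c = '?'
      · subst hc; simp [searchW, qIdx, cntAt?]
      · simp only [searchW, if_neg hc, qIdx, List.take_succ_cons, cntAt?]
        cases h : kidsGet? t.kids c with
        | none => simp
        | some child => simp [ih child]

theorem qIdx_of_not_mem {q : List Char} (h : '?' ∉ q) : qIdx q = q.length := by
  induction q with
  | nil => rfl
  | cons c r ih =>
      simp only [List.mem_cons, not_or] at h
      simp [qIdx, Ne.symm h.1, ih h.2]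

theorem qIdx_spec {q : List Char} (h : '?' ∈ q) :
    qIdx q < q.length ∧ q[qIdx q]? = some '?' ∧ ∀ i < qIdx q, q[i]? ≠ some '?' := by
  induction q with
  | nil => cases h
  | cons c r ih =>
      by_cases hc : c = '?'
      · subst hc; simp [qIdx]
      · have hr : '?' ∈ r := by
          rcases List.mem_cons.mp h with h1 | h1
          · exact absurd h1.symm hc
          · exact h1
        obtain ⟨h1, h2, h3⟩ := ih hr
        refine ⟨by simpa [qIdx, hc] using h1, by simpa [qIdx, hc] using h2, ?_⟩
        intro i hi
        simp only [qIdx, if_neg hc] at hi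
        cases i with
        | zero => simpa using hc
        | succ j => simpa using h3 j (by omega)

-- main characterization of A's per-length trie
theorem searchW_build (ws : List (List Char)) (q : List Char)
    (hlen : ∀ w ∈ ws, w.length = q.length) :
    searchW (ws.foldl addW emptyT) q =
      if '?' ∈ q then ((ws.countP fun w => decide (q.take (qIdx q) <+: w) : Nat) : Int) else 0 := by
  rw [searchW_eq_cntAt?, cntAt?_build]
  by_cases hq : '?' ∈ q
  · simp only [if_pos hq]
    have hlt : qIdx q < q.length := (qIdx_spec hq).1
    set p := q.take (qIdx q) with hp
    have hplen : p.length = qIdx q := by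
      simp [hp, List.length_take, Nat.min_eq_left (Nat.le_of_lt hlt)]
    have hcong : ws.countP (fun w => decide (p <+: w ∧ p ≠ w)) = ws.countP (fun w => decide (p <+: w)) := by
      apply List.countP_congr
      intro w hw
      have hlw : w.length = q.length := hlen w hw
      simp only [decide_eq_true_eq]
      constructor
      · exact fun h => h.1
      · intro h
        refine ⟨h, fun he => ?_⟩
        have := congrArg List.length he
        omega
    by_cases hex : p = [] ∨ ∃ w ∈ ws, p <+: w
    · rw [if_pos hex, hcong]
      simp
    · rw [if_neg hex]
      have hz : ws.countP (fun w => decide (p <+: w)) = 0 := by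
        rw [List.countP_eq_zero]
        intro w hw
        simp only [decide_eq_true_eq]
        intro hpw
        exact hex (Or.inr ⟨w, hw, hpw⟩)
      simp [hz]
  · simp only [if_neg hq]
    rw [qIdx_of_not_mem hq, List.take_length]
    by_cases hex : q = [] ∨ ∃ w ∈ ws, q <+: w
    · rw [if_pos hex]
      have hz : ws.countP (fun w => decide (q <+: w ∧ q ≠ w)) = 0 := by
        rw [List.countP_eq_zero]
        intro w hw
        simp only [decide_eq_true_eq, not_and]
        intro hpw hne
        exact hne (List.IsPrefix.eq_of_length hpw (by rw [hlen w hw]))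
      rw [hz]
      simp
    · rw [if_neg hex]
      simp

theorem singleton_prefix_iff (a : Char) (l : List Char) : [a] <+: l ↔ l.head? = some a := by
  cases l with
  | nil => simp
  | cons x r => simp [List.cons_prefix_cons, eq_comm]

theorem find_eq_qIdx (t : List Char) :
    PySem.Chars.find t ['?'] = if '?' ∈ t then ((qIdx t : Nat) : Int) else -1 := by
  by_cases h : '?' ∈ t
  · simp only [if_pos h]
    have hinf : ['?'] <:+: t := (List.singleton_infix_iff '?' t).mpr h
    have hnn : 0 ≤ PySem.Chars.find t ['?'] := (PySem.Chars.find_nonneg_iff t ['?']).mpr hinf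
    obtain ⟨hpre, hmin⟩ := PySem.Chars.find_spec (s := t) (sub := ['?']) hnn
    obtain ⟨hlt, hat, hbefore⟩ := qIdx_spec h
    have hje : qIdx t = (PySem.Chars.find t ['?']).toNat := by
      rcases Nat.lt_trichotomy (qIdx t) (PySem.Chars.find t ['?']).toNat with hc | hc | hc
      · exact absurd (by rw [singleton_prefix_iff, List.head?_drop]; exact hat) (hmin _ hc)
      · exact hc
      · have hj' : t[(PySem.Chars.find t ['?']).toNat]? = some '?' := by
          rw [← List.head?_drop, ← singleton_prefix_iff]; exact hpre
        exact absurd hj' (hbefore _ hc)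
    rw [hje, Int.toNat_of_nonneg hnn]
  · simp only [if_neg h]
    exact (PySem.Chars.find_eq_neg_one_iff t ['?']).mpr (fun hc => h ((List.singleton_infix_iff '?' t).mp hc))

theorem count_pyRange_one (a b x : Int) :
    (PySem.List.pyRange a b 1).count x = if a ≤ x ∧ x < b then 1 else 0 := by
  by_cases hm : x ∈ PySem.List.pyRange a b 1
  · rw [List.count_eq_one_of_mem (PySem.List.nodup_pyRange_one a b) hm,
      if_pos (PySem.List.mem_pyRange_one.mp hm)]
  · rw [List.count_eq_zero_of_not_mem hm, if_neg (fun hc => hm (PySem.List.mem_pyRange_one.mpr hc))]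

-- dispatching A's one-pass build over the per-length dict = per-length fold over the filtered words
theorem getD_buildFold (f : String → List Char) (L : Int) :
    ∀ (ws : List String) (d : PySem.Dict Int Trie),
    (ws.foldl (fun d w =>
        d.insert (w.toList.length : Int) (addW (d.getD (w.toList.length : Int) emptyT) (f w))) d).getD L emptyT
      = (ws.filter (fun w => ((w.toList.length : Int) == L))).foldl
          (fun t w => addW t (f w)) (d.getD L emptyT) := by
  intro ws
  induction ws with
  | nil => intro d; simp
  | cons w ws ih =>
      intro d
      simp only [List.foldl_cons, List.filter_cons]
      rw [ih, PySem.Dict.getD_insert]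
      by_cases hk : (w.toList.length : Int) = L
      · rw [if_pos hk.symm, if_pos (by simpa using hk), List.foldl_cons, hk]
      · rw [if_neg (Ne.symm hk), if_neg (by simpa using hk)]

-- B: the per-length word counter
theorem getD_lencnt (words : List String) (L : Int) :
    (words.foldl (fun (d : PySem.Dict Int Int) w =>
        d.insert (w.toList.length : Int) (d.getD (w.toList.length : Int) 0 + 1)) PySem.Dict.empty).getD L 0
      = ((words.countP fun w => ((w.toList.length : Int) == L) : Nat) : Int) := by
  rw [← List.foldl_map (f := fun w : String => (w.toList.length : Int))
      (g := fun (d : PySem.Dict Int Int) x => d.insert x (d.getD x 0 + 1)),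
    PySem.Dict.getD_foldl_insert_add_one, List.count_eq_countP, List.countP_map]
  simp [Function.comp_def]

-- B: one word's contribution to the prefix counter
theorem inner_prefix_count (w : String) (L : Int) (p : List Char) (hp : p ≠ [])
    (d : PySem.Dict (Int × List Char) Int) :
    ((PySem.List.pyRange 1 (w.toList.length : Int) 1).foldl
        (fun d i =>
          let k : Int × List Char := ((w.toList.length : Int), PySem.List.slice w.toList none (some i))
          d.insert k (d.getD k 0 + 1)) d).getD (L, p) 0
      = d.getD (L, p) 0 +
          (if ((w.toList.length : Int) == L) && (w.toList.take p.length == p)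
              && decide (p.length < w.toList.length) then 1 else 0) := by
  rw [← List.foldl_map
      (f := fun i : Int => (((w.toList.length : Int), PySem.List.slice w.toList none (some i)) : Int × List Char))
      (g := fun (d : PySem.Dict (Int × List Char) Int) k => d.insert k (d.getD k 0 + 1)),
    PySem.Dict.getD_foldl_insert_add_one, List.count_eq_countP, List.countP_map]
  congr 1
  by_cases hB : ((w.toList.length : Int) == L) && (w.toList.take p.length == p)
      && decide (p.length < w.toList.length)
  · simp only [hB, if_true]
    simp only [Bool.and_eq_true, beq_iff_eq, decide_eq_true_eq] at hB
    obtain ⟨⟨hL, htake⟩, hlt⟩ := hB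
    have hcong : List.countP
          ((fun k : Int × List Char => k == (L, p)) ∘
            fun i : Int => ((w.toList.length : Int), PySem.List.slice w.toList none (some i)))
          (PySem.List.pyRange 1 (w.toList.length : Int) 1)
        = List.countP (fun i : Int => i == (p.length : Int))
            (PySem.List.pyRange 1 (w.toList.length : Int) 1) := by
      apply List.countP_congr
      intro i hi
      obtain ⟨h1, h2⟩ := PySem.List.mem_pyRange_one.mp hi
      have h0 : (0 : Int) ≤ i := by omega
      simp only [Function.comp_apply, PySem.List.slice_to w.toList h0, beq_iff_eq, Prod.mk.injEq, hL,
        true_and]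
      constructor
      · intro ht
        have := congrArg List.length ht
        simp only [List.length_take] at this
        omega
      · intro hip
        have hin : i.toNat = p.length := by omega
        rw [hin, htake]
    rw [hcong, ← List.count_eq_countP, count_pyRange_one]
    have hp1 : 0 < p.length := List.length_pos_iff.mpr hp
    rw [if_pos ⟨by exact_mod_cast hp1, by exact_mod_cast hlt⟩]
    simp
  · simp only [hB]
    have hz : List.countP ((fun k : Int × List Char => k == (L, p)) ∘
        fun i : Int => ((w.toList.length : Int), PySem.List.slice w.toList none (some i)))
        (PySem.List.pyRange 1 (w.toList.length : Int) 1) = 0 := by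
      rw [List.countP_eq_zero]
      intro i hi
      obtain ⟨h1, h2⟩ := PySem.List.mem_pyRange_one.mp hi
      have h0 : (0 : Int) ≤ i := by omega
      simp only [Function.comp_apply, PySem.List.slice_to w.toList h0, beq_iff_eq, Prod.mk.injEq]
      rintro ⟨hL, htake⟩
      have hlen : p.length = i.toNat := by
        have := congrArg List.length htake
        simp only [List.length_take] at this
        omega
      apply hB
      simp only [Bool.and_eq_true, beq_iff_eq, decide_eq_true_eq]
      refine ⟨⟨hL, ?_⟩, by omega⟩
      rw [hlen, htake]
    rw [hz]
    simp

-- B: the prefix counter counts words of length L starting with the proper nonempty prefix p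
theorem getD_prefixCounts (L : Int) (p : List Char) (hp : p ≠ []) :
    ∀ (ws : List String),
    (prefixCounts ws).getD (L, p) 0
      = ((ws.countP fun w => ((w.toList.length : Int) == L) && (w.toList.take p.length == p)
            && decide (p.length < w.toList.length) : Nat) : Int) := by
  have main : ∀ (ws : List String) (d : PySem.Dict (Int × List Char) Int),
      (ws.foldl (fun d w =>
          (PySem.List.pyRange 1 (w.toList.length : Int) 1).foldl
            (fun d i =>
              let k : Int × List Char := ((w.toList.length : Int), PySem.List.slice w.toList none (some i))
              d.insert k (d.getD k 0 + 1)) d) d).getD (L, p) 0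
        = d.getD (L, p) 0 + ((ws.countP fun w => ((w.toList.length : Int) == L)
            && (w.toList.take p.length == p) && decide (p.length < w.toList.length) : Nat) : Int) := by
    intro ws
    induction ws with
    | nil => intro d; simp
    | cons w ws ih =>
        intro d
        rw [List.foldl_cons, ih, inner_prefix_count w L p hp d, List.countP_cons]
        by_cases hB : ((w.toList.length : Int) == L) && (w.toList.take p.length == p)
            && decide (p.length < w.toList.length)
        · rw [if_pos hB, if_pos hB]
          push_cast
          ring
        · rw [if_neg hB, if_neg hB]
          push_cast
          ring
  intro ws
  unfold prefixCounts
  rw [main]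
  simp

-- one side (forward or reversed): A's trie search = the three-way counting B performs
theorem side_eq (words : List String) (f : String → List Char)
    (hflen : ∀ w, (f w).length = w.toList.length) (t : List Char) :
    searchW (((words.filter (fun w => ((w.toList.length : Int) == (t.length : Int)))).map f).foldl
        addW emptyT) t
      = (if PySem.Chars.find t ['?'] = -1 then 0
         else if PySem.Chars.find t ['?'] = 0 then
           ((words.countP fun w => ((w.toList.length : Int) == (t.length : Int)) : Nat) : Int)
         else
           ((words.countP fun w => (((f w).length : Int) == (t.length : Int))
               && ((f w).take (t.take (qIdx t)).length == t.take (qIdx t))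
               && decide ((t.take (qIdx t)).length < (f w).length) : Nat) : Int)) := by
  have hlen : ∀ v ∈ (words.filter (fun w => ((w.toList.length : Int) == (t.length : Int)))).map f,
      v.length = t.length := by
    intro v hv
    obtain ⟨w, hw, rfl⟩ := List.mem_map.mp hv
    have := List.of_mem_filter hw
    simp only [beq_iff_eq, Nat.cast_inj] at this
    rw [hflen w, this]
  rw [searchW_build _ _ hlen, find_eq_qIdx]
  by_cases hmem : '?' ∈ t
  · obtain ⟨hlt, -, -⟩ := qIdx_spec hmem
    simp only [if_pos hmem]
    have hne : ¬ ((qIdx t : Nat) : Int) = -1 := by omega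
    rw [if_neg hne]
    by_cases h0 : qIdx t = 0
    · rw [if_pos (by simp [h0])]
      simp only [h0, List.take_zero]
      rw [List.countP_congr (q := fun _ => true) (by simp), List.countP_true, List.length_map,
        ← List.countP_eq_length_filter]
    · rw [if_neg (by simpa using h0)]
      rw [List.countP_map, List.countP_filter]
      congr 1
      apply List.countP_congr
      intro w _
      simp only [Function.comp_apply]
      by_cases hw : (w.toList.length : Int) = (t.length : Int)
      · have h1 : ((w.toList.length : Int) == (t.length : Int)) = true := beq_iff_eq.mpr hw
        have h2 : (((f w).length : Int) == (t.length : Int)) = true := by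
          rw [hflen w]; exact beq_iff_eq.mpr hw
        have hfw : (f w).length = t.length := by rw [hflen w]; exact_mod_cast hw
        have hplen : (t.take (qIdx t)).length = qIdx t := by
          rw [List.length_take, Nat.min_eq_left (Nat.le_of_lt hlt)]
        have hsz : decide ((t.take (qIdx t)).length < (f w).length) = true := by
          simp only [decide_eq_true_eq]; omega
        rw [h1, h2, hsz]
        simp only [Bool.and_true, Bool.true_and]
        by_cases hpre : t.take (qIdx t) <+: f w
        · have heq : (f w).take (t.take (qIdx t)).length = t.take (qIdx t) :=
            (List.prefix_iff_eq_take.mp hpre).symm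
          rw [hplen] at heq
          simp [hpre]
          rw [Nat.min_eq_left (Nat.le_of_lt hlt)]
          exact heq
        · have hne2 : ¬ ((f w).take (t.take (qIdx t)).length = t.take (qIdx t)) :=
            fun h => hpre (List.prefix_iff_eq_take.mpr h.symm)
          rw [hplen] at hne2
          simp [hpre]
          rw [Nat.min_eq_left (Nat.le_of_lt hlt)]
          exact hne2
      · have h1 : ((w.toList.length : Int) == (t.length : Int)) = false := beq_eq_false_iff_ne.mpr hw
        have h2 : (((f w).length : Int) == (t.length : Int)) = false := by
          rw [hflen w]; exact beq_eq_false_iff_ne.mpr hw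
        rw [h1, h2]
        simp
  · simp [hmem]
-- ===== VERDICT (by name: the statement is the Claim_ definition above) =====
theorem solution_spec : Claim_equal_solution := by
  unfold Claim_equal_solution
  intro words queries _ _
  unfold Spec_solution solution solution_alt
  simp only []
  rw [PySem.List.foldl_prod_mk
    (f := fun (d : PySem.Dict Int Trie) (w : String) =>
      d.insert (w.toList.length : Int) (addW (d.getD (w.toList.length : Int) emptyT) w.toList))
    (g := fun (d : PySem.Dict Int Trie) (w : String) =>
      d.insert (w.toList.length : Int) (addW (d.getD (w.toList.length : Int) emptyT) w.toList.reverse))]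
  rw [PySem.List.foldl_append_singleton_eq_map, PySem.List.foldl_append_singleton_eq_map]
  simp only [List.nil_append]
  apply List.map_congr_left
  intro q _
  cases hql : q.toList with
  | nil => simp
  | cons c cs =>
      simp only []
      by_cases hc : c = '?'
      · -- reversed side
        simp only [if_pos hc]
        rw [show ((c :: cs).length : Int) = (((c :: cs).reverse).length : Int) by simp]
        rw [getD_buildFold (fun w => w.toList.reverse) (((c :: cs).reverse).length : Int) words
          PySem.Dict.empty]
        rw [PySem.Dict.getD_empty]
        rw [← List.foldl_map (f := fun w : String => w.toList.reverse) (g := addW)]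
        rw [side_eq words (fun w => w.toList.reverse) (fun w => by simp) ((c :: cs).reverse)]
        rw [find_eq_qIdx]
        by_cases hmem : '?' ∈ (c :: cs).reverse
        · simp only [if_pos hmem]
          obtain ⟨hlt, -, -⟩ := qIdx_spec hmem
          have hne : ¬ ((qIdx ((c :: cs).reverse) : Nat) : Int) = -1 := by omega
          rw [if_neg hne, if_neg hne]
          by_cases h0 : qIdx ((c :: cs).reverse) = 0
          · rw [if_pos (by exact_mod_cast h0), if_pos (by exact_mod_cast h0), getD_lencnt]
          · rw [if_neg (fun hcon => h0 (by exact_mod_cast hcon)), if_neg (fun hcon => h0 (by exact_mod_cast hcon))]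
            rw [PySem.List.slice_to ((c :: cs).reverse) (by positivity)]
            have hp : ((c :: cs).reverse).take (((qIdx ((c :: cs).reverse) : Nat) : Int)).toNat ≠ [] := by
              simp only [Int.toNat_natCast, ne_eq, List.take_eq_nil_iff]
              push Not
              exact ⟨h0, by simp⟩
            rw [getD_prefixCounts _ _ hp, List.countP_map]
            simp only [Int.toNat_natCast, Function.comp_def, String.toList_ofList]
        · exact absurd (List.mem_reverse.mpr (by simp [hc])) hmem
      · -- forward side
        simp only [if_neg hc]
        rw [getD_buildFold (fun w => w.toList) (((c :: cs)).length : Int) words PySem.Dict.empty]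
        rw [PySem.Dict.getD_empty]
        rw [← List.foldl_map (f := fun w : String => w.toList) (g := addW)]
        rw [side_eq words (fun w => w.toList) (fun w => rfl) (c :: cs)]
        rw [find_eq_qIdx]
        by_cases hmem : '?' ∈ (c :: cs)
        · simp only [if_pos hmem]
          obtain ⟨hlt, -, -⟩ := qIdx_spec hmem
          have hne : ¬ ((qIdx (c :: cs) : Nat) : Int) = -1 := by omega
          rw [if_neg hne, if_neg hne]
          by_cases h0 : qIdx (c :: cs) = 0
          · rw [if_pos (by exact_mod_cast h0), if_pos (by exact_mod_cast h0), getD_lencnt]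
          · rw [if_neg (fun hcon => h0 (by exact_mod_cast hcon)), if_neg (fun hcon => h0 (by exact_mod_cast hcon))]
            rw [PySem.List.slice_to (c :: cs) (by positivity)]
            have hp : (c :: cs).take (((qIdx (c :: cs) : Nat) : Int)).toNat ≠ [] := by
              simp only [Int.toNat_natCast, ne_eq, List.take_eq_nil_iff]
              push Not
              exact ⟨h0, by simp⟩
            rw [getD_prefixCounts _ _ hp]
            simp only [Int.toNat_natCast]
            rfl
        · simp [hmem]
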